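-- pv_equiv track=rewrite | github.com/gratach/distrida | src/distrida/address_system/weg.py | teilWegZuUIntR
-- ===== SOURCE A (Python) =====
-- def teilWegZuUIntR(weg):
--     l = len(weg)
--     i = 0
--     mul = 1
--     ges = 0
--     while i < l:
--         ges += ((253 - weg[i]) + 1) * mul
--         mul *= 254
--         i += 1
--     return ges
-- ===== SOURCE B (Python) =====
-- def teilWegZuUIntR(weg):
--     ges = 0
--     for d in reversed(weg):
--         ges = ges * 254 + (254 - d)
--     return ges
-- ===== Notes on version B (the rewrite author's own statement) =====
-- stated objective: idiomatic
-- what changed: Replaces the indexed low-to-high loop tracking an explicit power variable mul with a Horner evaluation over the reversed list using a single accumulator.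
import Mathlib
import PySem

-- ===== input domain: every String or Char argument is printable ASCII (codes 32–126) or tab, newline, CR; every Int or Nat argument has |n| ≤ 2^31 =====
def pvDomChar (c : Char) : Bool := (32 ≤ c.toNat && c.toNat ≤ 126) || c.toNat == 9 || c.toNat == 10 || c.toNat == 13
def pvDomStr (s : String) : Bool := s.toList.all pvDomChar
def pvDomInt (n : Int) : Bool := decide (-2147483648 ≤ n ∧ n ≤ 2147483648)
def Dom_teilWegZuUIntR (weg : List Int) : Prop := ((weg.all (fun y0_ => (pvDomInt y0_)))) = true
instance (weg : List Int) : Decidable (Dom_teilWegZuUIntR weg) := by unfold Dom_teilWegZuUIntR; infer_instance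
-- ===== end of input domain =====

-- B replaces A's indexed loop with an explicit power accumulator by a Horner evaluation over the reversed list (idiomatic decomposition, same O(n) cost).

-- ===== PORT A =====
-- A's while loop over index i carrying (mul, ges); i always in range, so iterating the list elements in order is the same traversal.
def teilWegZuUIntR_loop : List Int → Int → Int → Int
  | [], _, ges => ges
  | d :: t, mul, ges => teilWegZuUIntR_loop t (mul * 254) (ges + ((253 - d) + 1) * mul)

def teilWegZuUIntR (weg : List Int) : Int :=
  teilWegZuUIntR_loop weg 1 0

-- ===== PORT B =====
def teilWegZuUIntR_alt (weg : List Int) : Int :=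
  weg.reverse.foldl (fun ges d => ges * 254 + (254 - d)) 0

-- ===== PRECONDITION & SPEC =====
def Spec_teilWegZuUIntR (weg : List Int) (out : Int) : Prop := out = teilWegZuUIntR_alt weg
instance (weg : List Int) (out : Int) : Decidable (Spec_teilWegZuUIntR weg out) := by unfold Spec_teilWegZuUIntR; infer_instance

-- ===== CLAIM (what is proved, stated in full; the proofs are below) =====
def Claim_equal_teilWegZuUIntR : Prop := ∀ (weg : List Int), Dom_teilWegZuUIntR weg → Spec_teilWegZuUIntR weg (teilWegZuUIntR weg)

-- ===== LEMMAS AND PROOFS =====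

-- the common base-254 polynomial value
def pvPoly : List Int → Int
  | [] => 0
  | d :: t => (254 - d) + 254 * pvPoly t

lemma loopA_eq_poly (xs : List Int) : ∀ mul ges,
    teilWegZuUIntR_loop xs mul ges = ges + mul * pvPoly xs := by
  induction xs with
  | nil => intro mul ges; simp [teilWegZuUIntR_loop, pvPoly]
  | cons d t ih =>
    intro mul ges
    simp only [teilWegZuUIntR_loop, pvPoly, ih]
    ring

lemma horner_eq_poly (xs : List Int) :
    xs.reverse.foldl (fun ges d => ges * 254 + (254 - d)) 0 = pvPoly xs := by
  induction xs with
  | nil => simp [pvPoly]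
  | cons d t ih =>
    simp only [List.reverse_cons, List.foldl_append, ih, List.foldl_cons, List.foldl_nil, pvPoly]
    ring

-- ===== VERDICT (by name: the statement is the Claim_ definition above) =====
theorem teilWegZuUIntR_spec : Claim_equal_teilWegZuUIntR := by
  intro weg _
  unfold Spec_teilWegZuUIntR teilWegZuUIntR teilWegZuUIntR_alt
  rw [loopA_eq_poly, horner_eq_poly]
  ring
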